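-- pv_equiv track=rewrite | github.com/mflyn/lottery | scripts/find_top_ssq.py | calc_ac_value
-- ===== SOURCE A (Python) =====
-- from typing import List, Tuple, Dict, Any
--
-- def calc_ac_value(nums: List[int]) -> int:
--     s = sorted(nums)
--     diffs = set()
--     n = len(s)
--     for i in range(n):
--         for j in range(i + 1, n):
--             diffs.add(s[j] - s[i])
--     return len(diffs) - (n - 1)
-- ===== SOURCE B (Python) =====
-- def calc_ac_value(nums):
--     n = len(nums)
--     if n == 0:
--         return 1
--     W = 4096
--     m = min(nums)
--     # sparse bitset of the values, offset by the minimum: bit r of block q <=> m + W*q + r occurs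
--     bits = {}
--     for v in nums:
--         q, r = divmod(v - m, W)
--         bits[q] = bits.get(q, 0) | (1 << r)
--     # sparse bitset of the nonnegative pairwise differences: OR of bits >> (v - m) over all v
--     diff = {}
--     for v in nums:
--         q, r = divmod(v - m, W)
--         for B, w in bits.items():
--             t = B - q
--             if t >= 0:
--                 diff[t] = diff.get(t, 0) | (w >> r)
--             if t >= 1 and r:
--                 diff[t - 1] = diff.get(t - 1, 0) | ((w << (W - r)) & ((1 << W) - 1))
--     distinct = sum(w.bit_count() for w in bits.values())
--     dup = 1 if distinct < n else 0
--     total = sum(w.bit_count() for w in diff.values())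
--     return (total - 1) + dup - (n - 1)
-- ===== Notes on version B (the rewrite author's own statement) =====
-- stated objective: faster
-- what changed: B replaces the nested all-pairs loop over a sorted copy by a sparse chunked bitset: values offset by the minimum become bits in a dict of 4096-bit words, OR-ing shifted copies of that bitset yields the bitset of all pairwise differences, and the result is read off popcount sums (plus a duplicate flag for the zero difference).
import Mathlib
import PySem

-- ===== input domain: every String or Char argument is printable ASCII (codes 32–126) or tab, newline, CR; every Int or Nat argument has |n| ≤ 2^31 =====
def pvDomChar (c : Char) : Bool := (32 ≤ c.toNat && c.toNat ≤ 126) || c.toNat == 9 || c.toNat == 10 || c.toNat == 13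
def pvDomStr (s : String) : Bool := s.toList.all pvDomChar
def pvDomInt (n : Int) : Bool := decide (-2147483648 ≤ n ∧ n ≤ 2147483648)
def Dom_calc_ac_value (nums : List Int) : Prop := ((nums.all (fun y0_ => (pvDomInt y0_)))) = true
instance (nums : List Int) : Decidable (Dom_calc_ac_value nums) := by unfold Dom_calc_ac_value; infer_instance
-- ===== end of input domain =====

set_option maxRecDepth 8192

-- B replaces A's sorted all-pairs scan by a sparse chunked bitset: values offset by the
-- minimum become bits in a dict of 4096-bit words, ORing shifted copies of that bitset
-- yields the bitset of all pairwise differences, and the result is read off popcount sums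
-- (measured much faster on the timing family, where each word op covers many candidates).

-- ===== PORT A =====
def calc_ac_value (nums : List Int) : Int :=
  let s := PySem.List.sorted nums (fun x => x) false
  let n := PySem.List.len s
  let diffs : PySem.Set Int :=
    (PySem.List.pyRange 0 n 1).foldl (fun d i =>
      (PySem.List.pyRange (i + 1) n 1).foldl (fun d j =>
        PySem.Set.add d (PySem.List.pyGetD s j 0 - PySem.List.pyGetD s i 0)) d)
      PySem.Set.empty
  PySem.Set.len diffs - (n - 1)

-- ===== PORT B =====
-- `1 << r`, `w >> r`, `w << (W - r)` are ported with Nat shift amounts via .toNat, exact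
-- because r = (v - min) % 4096 is nonnegative; the dicts are PySem.Dict.
def calc_ac_value_alt (nums : List Int) : Int :=
  let n := PySem.List.len nums
  -- Python: `if n == 0: return 1`; `min?` is none exactly on the empty list
  match PySem.List.min? nums (fun x => x) with
  | none => 1
  | some m =>
    let bits : PySem.Dict Int Int :=
      nums.foldl (fun d v =>
        let q := PySem.Int.floordiv (v - m) 4096
        let r := PySem.Int.mod (v - m) 4096
        d.insert q (PySem.Int.bor (d.getD q 0) ((1 : Int) <<< r.toNat))) PySem.Dict.empty
    let diff : PySem.Dict Int Int :=
      nums.foldl (fun d v =>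
        let q := PySem.Int.floordiv (v - m) 4096
        let r := PySem.Int.mod (v - m) 4096
        bits.items.foldl (fun d bw =>
          let t := bw.1 - q
          let d1 := if 0 ≤ t then d.insert t (PySem.Int.bor (d.getD t 0) ((bw.2 : Int) >>> r.toNat)) else d
          if 1 ≤ t ∧ r ≠ 0 then
            d1.insert (t - 1) (PySem.Int.bor (d1.getD (t - 1) 0)
              (PySem.Int.band ((bw.2 : Int) <<< (4096 - r).toNat) ((1 : Int) <<< (4096 : Nat) - 1)))
          else d1) d) PySem.Dict.empty
    let distinct : Int := (bits.values.map (fun w => (PySem.Int.bitCount w : Int))).sum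
    let dup : Int := if distinct < n then 1 else 0
    let total : Int := (diff.values.map (fun w => (PySem.Int.bitCount w : Int))).sum
    (total - 1) + dup - (n - 1)

-- ===== PRECONDITION & SPEC =====
def Spec_calc_ac_value (nums : List Int) (out : Int) : Prop := out = calc_ac_value_alt nums
instance (nums : List Int) (out : Int) : Decidable (Spec_calc_ac_value nums out) := by unfold Spec_calc_ac_value; infer_instance

-- ===== CLAIM (what is proved, stated in full; the proofs are below) =====
def Claim_equal_calc_ac_value : Prop := ∀ (nums : List Int), Dom_calc_ac_value nums → Spec_calc_ac_value nums (calc_ac_value nums)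

-- ===== LEMMAS AND PROOFS =====

-- A's difference set, named for the proofs
def pvAset (nums : List Int) : PySem.Set Int :=
  (PySem.List.pyRange 0 (PySem.List.len (PySem.List.sorted nums (fun x => x) false)) 1).foldl (fun d i =>
    (PySem.List.pyRange (i + 1) (PySem.List.len (PySem.List.sorted nums (fun x => x) false)) 1).foldl (fun d j =>
      PySem.Set.add d (PySem.List.pyGetD (PySem.List.sorted nums (fun x => x) false) j 0
        - PySem.List.pyGetD (PySem.List.sorted nums (fun x => x) false) i 0)) d)
    PySem.Set.empty

theorem calc_eq_pvAset (nums : List Int) :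
    calc_ac_value nums = PySem.Set.len (pvAset nums)
      - (PySem.List.len (PySem.List.sorted nums (fun x => x) false) - 1) := rfl

-- the common description of a (positive) pairwise difference
def pvGood (nums : List Int) (y : Int) : Prop := ∃ a ∈ nums, ∃ b ∈ nums, a < b ∧ y = b - a

theorem pv_mem_foldl_step (g : PySem.Set Int → Int → PySem.Set Int)
    (P : Int → Int → Prop)
    (hg : ∀ d i y, y ∈ g d i ↔ y ∈ d ∨ P i y) :
    ∀ (l : List Int) (d : PySem.Set Int) (y : Int),
      y ∈ l.foldl g d ↔ y ∈ d ∨ ∃ i ∈ l, P i y := by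
  intro l
  induction l with
  | nil => intro d y; simp
  | cons x t ih =>
    intro d y
    simp only [List.foldl_cons, ih, hg, List.mem_cons]
    constructor
    · rintro ((h | h) | ⟨i, hi, h⟩)
      · exact Or.inl h
      · exact Or.inr ⟨x, Or.inl rfl, h⟩
      · exact Or.inr ⟨i, Or.inr hi, h⟩
    · rintro (h | ⟨i, (rfl | hi), h⟩)
      · exact Or.inl (Or.inl h)
      · exact Or.inl (Or.inr h)
      · exact Or.inr ⟨i, hi, h⟩

theorem pv_nodup_foldl_step (g : PySem.Set Int → Int → PySem.Set Int)
    (hg : ∀ d i, d.Nodup → (g d i).Nodup) :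
    ∀ (l : List Int) (d : PySem.Set Int), d.Nodup → (l.foldl g d).Nodup := by
  intro l
  induction l with
  | nil => intro d hd; simpa using hd
  | cons x t ih => intro d hd; exact ih _ (hg d x hd)

theorem pv_pairs_char (s nums : List Int) (hperm : s.Perm nums)
    (hmono : ∀ (p q : Nat) (hp : p < s.length) (hq : q < s.length), p ≤ q → s[p]'hp ≤ s[q]'hq)
    (y : Int) :
    (∃ i ∈ PySem.List.pyRange 0 (s.length : Int) 1,
       ∃ j ∈ PySem.List.pyRange (i + 1) (s.length : Int) 1,
         y = PySem.List.pyGetD s j 0 - PySem.List.pyGetD s i 0)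
    ↔ (y = 0 ∧ ¬ nums.Nodup) ∨ pvGood nums y := by
  constructor
  · rintro ⟨i, hi, j, hj, rfl⟩
    rw [PySem.List.mem_pyRange_one] at hi hj
    have hJl : j.toNat < s.length := by omega
    have hIl : i.toNat < s.length := by omega
    rw [PySem.List.pyGetD_eq_getElem s 0 (by omega) (by omega),
        PySem.List.pyGetD_eq_getElem s 0 (by omega) (by omega)]
    have hle := hmono i.toNat j.toNat hIl hJl (by omega)
    rcases eq_or_lt_of_le hle with heq | hlt
    · refine Or.inl ⟨by omega, fun hnd => ?_⟩
      have hsnd := (hperm.nodup_iff).mpr hnd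
      have := (List.Nodup.getElem_inj_iff hsnd).mp heq
      omega
    · exact Or.inr ⟨s[i.toNat], hperm.mem_iff.mp (List.getElem_mem _),
        s[j.toNat], hperm.mem_iff.mp (List.getElem_mem _), hlt, rfl⟩
  · rintro (⟨rfl, hnd⟩ | ⟨a, ha, b, hb, hab, rfl⟩)
    · have hsnd : ¬ s.Nodup := fun h => hnd ((hperm.nodup_iff).mp h)
      rw [List.nodup_iff_injective_get, Function.not_injective_iff] at hsnd
      obtain ⟨p, q, hpq, hne⟩ := hsnd
      simp only [List.get_eq_getElem] at hpq
      have hp := p.isLt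
      have hq := q.isLt
      have hval : p.val ≠ q.val := fun h => hne (Fin.ext h)
      rcases Nat.lt_or_ge p.val q.val with h | h
      · refine ⟨(p.val : Int), by rw [PySem.List.mem_pyRange_one]; omega,
          (q.val : Int), by rw [PySem.List.mem_pyRange_one]; omega, ?_⟩
        rw [PySem.List.pyGetD_eq_getElem s 0 (by omega) (by omega),
            PySem.List.pyGetD_eq_getElem s 0 (by omega) (by omega)]
        simp only [Int.toNat_natCast]
        omega
      · have h' : q.val < p.val := by omega
        refine ⟨(q.val : Int), by rw [PySem.List.mem_pyRange_one]; omega,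
          (p.val : Int), by rw [PySem.List.mem_pyRange_one]; omega, ?_⟩
        rw [PySem.List.pyGetD_eq_getElem s 0 (by omega) (by omega),
            PySem.List.pyGetD_eq_getElem s 0 (by omega) (by omega)]
        simp only [Int.toNat_natCast]
        omega
    · obtain ⟨I, hI, hIa⟩ := List.mem_iff_getElem.mp (hperm.mem_iff.mpr ha)
      obtain ⟨J, hJ, hJb⟩ := List.mem_iff_getElem.mp (hperm.mem_iff.mpr hb)
      have hne : I ≠ J := by
        intro h; subst h; rw [hIa] at hJb; omega
      rcases Nat.lt_or_ge I J with h | h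
      · refine ⟨(I : Int), by rw [PySem.List.mem_pyRange_one]; omega,
          (J : Int), by rw [PySem.List.mem_pyRange_one]; omega, ?_⟩
        rw [PySem.List.pyGetD_eq_getElem s 0 (by omega) (by omega),
            PySem.List.pyGetD_eq_getElem s 0 (by omega) (by omega)]
        simp only [Int.toNat_natCast]
        omega
      · have h' : J < I := by omega
        have := hmono J I hJ hI (by omega)
        omega

theorem pv_memA_char (nums : List Int) (y : Int) :
    y ∈ pvAset nums ↔ (y = 0 ∧ ¬ nums.Nodup) ∨ pvGood nums y := by
  unfold pvAset
  rw [pv_mem_foldl_step _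
      (fun i y => ∃ j ∈ PySem.List.pyRange (i + 1) (PySem.List.len (PySem.List.sorted nums (fun x => x) false)) 1,
        y = PySem.List.pyGetD (PySem.List.sorted nums (fun x => x) false) j 0
          - PySem.List.pyGetD (PySem.List.sorted nums (fun x => x) false) i 0)
      (fun d i y => PySem.Set.mem_foldl_add _ _ _ _) _ _ _]
  rw [PySem.List.len_eq]
  have h0 : (y ∈ PySem.Set.empty (α := Int)) = False := by simp [PySem.Set.empty]
  rw [h0]
  rw [false_or]
  exact pv_pairs_char _ nums (PySem.List.sorted_perm nums (fun x => x) false)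
    (fun p q hp hq hpq => PySem.List.sorted_id_getElem_mono nums hpq hq) y

theorem pv_nodupA (nums : List Int) : (pvAset nums).Nodup := by
  unfold pvAset
  refine pv_nodup_foldl_step _ (fun d i hd => ?_) _ _ (by simp [PySem.Set.empty])
  exact pv_nodup_foldl_step _ (fun d j hd => PySem.Set.nodup_add _ _ hd) _ _ hd

theorem pv_zero_not_good (nums : List Int) : ¬ pvGood nums 0 := by
  rintro ⟨a, _, b, _, hab, h⟩; omega

-- popcount on Nat, the value PySem.Int.bitCount computes on nonnegative ints
def pvPop (n : Nat) : Nat :=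
  if n = 0 then 0 else n % 2 + pvPop (n / 2)
decreasing_by exact Nat.div_lt_self (Nat.pos_of_ne_zero (by assumption)) (by omega)

-- PySem.Int.bitCount on a cast Nat is pvPop
theorem pv_bitCount_eq_pop (a : Nat) : PySem.Int.bitCount (a : Int) = pvPop a := by
  induction a using Nat.strong_induction_on with
  | _ a ih =>
    rcases Nat.eq_zero_or_pos a with rfl | ha
    · rw [pvPop]; simpa using PySem.Int.bitCount_zero
    · rw [PySem.Int.bitCount_natCast ha, pvPop, if_neg (by omega),
        ih (a / 2) (Nat.div_lt_self ha (by omega))]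

theorem pv_pop_step (a : Nat) (ha : 0 < a) : pvPop a = a % 2 + pvPop (a / 2) := by
  rw [pvPop, if_neg (by omega)]

-- pvPop counts the set bits below any sufficient bound
theorem pv_pop_card : ∀ (k a : Nat), a < 2 ^ k →
    pvPop a = ((Finset.range k).filter (a.testBit ·)).card := by
  intro k
  induction k with
  | zero =>
    intro a ha
    interval_cases a
    simp [pvPop]
  | succ k ih =>
    intro a ha
    rcases Nat.eq_zero_or_pos a with rfl | hpos
    · simp [pvPop]
    · rw [pv_pop_step a hpos, Finset.card_filter, Finset.sum_range_succ',
        ← Finset.card_filter]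
      simp only [Nat.testBit_add_one, Nat.testBit_zero]
      rw [← ih (a / 2) (by omega)]
      have h2 : a % 2 = if (decide (a % 2 = 1) : Bool) = true then 1 else 0 := by
        rcases Nat.mod_two_eq_zero_or_one a with h | h <;> simp [h]
      omega

-- ==== B-side machinery: global-bit view of the chunked bitsets ====

-- step functions of B's two loops (the port's lambdas, lets expanded)
def pvStep1 (m : Int) (d : PySem.Dict Int Int) (v : Int) : PySem.Dict Int Int :=
  d.insert (PySem.Int.floordiv (v - m) 4096)
    (PySem.Int.bor (d.getD (PySem.Int.floordiv (v - m) 4096) 0)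
      ((1 : Int) <<< (PySem.Int.mod (v - m) 4096).toNat))

-- phase-2 step with the offset value's floordiv/mod precomputed into q r
def pvStep2 (q r : Int) (d : PySem.Dict Int Int) (bw : Int × Int) : PySem.Dict Int Int :=
  let t := bw.1 - q
  let d1 := if 0 ≤ t then d.insert t (PySem.Int.bor (d.getD t 0) ((bw.2 : Int) >>> r.toNat)) else d
  if 1 ≤ t ∧ r ≠ 0 then
    d1.insert (t - 1) (PySem.Int.bor (d1.getD (t - 1) 0)
      (PySem.Int.band ((bw.2 : Int) <<< (4096 - r).toNat) ((1 : Int) <<< (4096 : Nat) - 1)))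
  else d1

-- global bit p of a chunked bitset
def pvGb (d : PySem.Dict Int Int) (p : Nat) : Prop :=
  ((d.getD ((p / 4096 : Nat) : Int) 0).toNat).testBit (p % 4096) = true

-- well-formedness: every word is a nonnegative 4096-bit value
def pvWfD (d : PySem.Dict Int Int) : Prop :=
  ∀ k : Int, 0 ≤ d.getD k 0 ∧ d.getD k 0 < 2 ^ 4096

theorem pv_floordiv_toNat (a : Int) (h : 0 ≤ a) :
    PySem.Int.floordiv a 4096 = ((a.toNat / 4096 : Nat) : Int) := by
  simp [PySem.Int.floordiv]
  rw [Int.fdiv_eq_ediv]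
  omega

theorem pv_mod_toNat (a : Int) (h : 0 ≤ a) :
    PySem.Int.mod a 4096 = ((a.toNat % 4096 : Nat) : Int) := by
  simp [PySem.Int.mod]
  rw [Int.fmod_eq_emod]
  omega

theorem pv_wf_empty : pvWfD PySem.Dict.empty := by
  intro k
  constructor
  · simp [PySem.Dict.getD_empty]
  · simp only [PySem.Dict.getD_empty]
    positivity

theorem pv_toNat_lt_pow (w : Int) : w.toNat < 2 ^ 4096 ↔ w < 2 ^ 4096 := by
  rw [show ((2 : Int) ^ 4096) = ((2 ^ 4096 : Nat) : Int) by push_cast; ring]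
  have h1 : 1 ≤ 2 ^ 4096 := Nat.one_le_two_pow
  omega

theorem pv_cast_nonneg_lt (a : Nat) (h : a < 2 ^ 4096) :
    0 ≤ ((a : Nat) : Int) ∧ ((a : Nat) : Int) < 2 ^ 4096 := by
  have := (pv_toNat_lt_pow ((a : Nat) : Int)).mp (by rw [Int.toNat_natCast]; exact h)
  exact ⟨Int.natCast_nonneg a, this⟩

theorem pv_bor_one_shift (w : Int) (h0 : 0 ≤ w) (sr : Nat) :
    PySem.Int.bor w ((1 : Int) <<< sr) = ((w.toNat ||| (1 <<< sr) : Nat) : Int) := by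
  obtain ⟨a, rfl⟩ := Int.eq_ofNat_of_zero_le h0
  rw [show ((1 : Int) <<< sr) = (((1 <<< sr : Nat) : Nat) : Int) from rfl,
      PySem.Int.bor_natCast]
  simp

theorem pv_step1_char (m v : Int) (hv : m ≤ v) (d : PySem.Dict Int Int) (hwf : pvWfD d) :
    pvWfD (pvStep1 m d v)
    ∧ (∀ k ∈ (pvStep1 m d v).keys, k ∈ d.keys ∨ 0 ≤ k)
    ∧ (d.keys.Nodup → (pvStep1 m d v).keys.Nodup)
    ∧ (∀ p : Nat, pvGb (pvStep1 m d v) p ↔ pvGb d p ∨ (v - m).toNat = p) := by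
  unfold pvStep1
  rw [pv_floordiv_toNat _ (by omega), pv_mod_toNat _ (by omega)]
  simp only [Int.toNat_natCast]
  set s := (v - m).toNat with hs
  set K : Int := ((s / 4096 : Nat) : Int) with hK
  have hw := hwf K
  have hwnat : (d.getD K 0).toNat < 2 ^ 4096 := (pv_toNat_lt_pow _).mpr hw.2
  have hsr : s % 4096 < 4096 := Nat.mod_lt _ (by omega)
  have hcast := pv_bor_one_shift (d.getD K 0) hw.1 (s % 4096)
  have hnewlt : ((d.getD K 0).toNat ||| (1 <<< (s % 4096)) : Nat) < 2 ^ 4096 := by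
    refine Nat.or_lt_two_pow hwnat ?_
    rw [Nat.one_shiftLeft]
    exact Nat.pow_lt_pow_right (by omega) hsr
  refine ⟨?_, ?_, ?_, ?_⟩
  · intro k
    rw [PySem.Dict.getD_insert]
    split
    · rw [hcast]
      exact pv_cast_nonneg_lt _ hnewlt
    · exact hwf k
  · intro k hk
    rcases (PySem.Dict.mem_keys_insert _ _ _ _).mp hk with rfl | hk'
    · exact Or.inr (Int.natCast_nonneg _)
    · exact Or.inl hk'
  · intro hnd
    exact PySem.Dict.nodup_keys_insert _ _ _ hnd
  · intro p
    unfold pvGb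
    rw [PySem.Dict.getD_insert]
    split
    · rename_i hb
      rw [hcast]
      simp only [Int.toNat_natCast]
      rw [Nat.testBit_or, Nat.one_shiftLeft, Nat.testBit_two_pow]
      have hblock : p / 4096 = s / 4096 := by
        have := hK ▸ hb
        omega
      rw [hb]
      simp only [Bool.or_eq_true, decide_eq_true_eq]
      constructor
      · rintro (h | h)
        · exact Or.inl h
        · exact Or.inr (by omega)
      · rintro (h | h)
        · exact Or.inl h
        · exact Or.inr (by omega)
    · rename_i hb
      constructor
      · exact Or.inl
      · rintro (h | h)
        · exact h
        · exfalso
          apply hb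
          rw [hK]
          congr 1
          omega

theorem pv_phase1 (m : Int) :
    ∀ (l : List Int), (∀ v ∈ l, m ≤ v) → ∀ (d : PySem.Dict Int Int), pvWfD d →
      pvWfD (l.foldl (pvStep1 m) d)
      ∧ (∀ k ∈ (l.foldl (pvStep1 m) d).keys, k ∈ d.keys ∨ 0 ≤ k)
      ∧ (d.keys.Nodup → (l.foldl (pvStep1 m) d).keys.Nodup)
      ∧ (∀ p : Nat, pvGb (l.foldl (pvStep1 m) d) p ↔ pvGb d p ∨ ∃ v ∈ l, (v - m).toNat = p) := by
  intro l
  induction l with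
  | nil =>
    intro _ d hwf
    exact ⟨hwf, fun k hk => Or.inl hk, fun h => h, fun p => by simp⟩
  | cons x t ih =>
    intro hl d hwf
    obtain ⟨hwf1, hkeys1, hnd1, hgb1⟩ := pv_step1_char m x (hl x (by simp)) d hwf
    obtain ⟨hwf2, hkeys2, hnd2, hgb2⟩ := ih (fun v hv => hl v (by simp [hv])) (pvStep1 m d x) hwf1
    refine ⟨hwf2, ?_, fun h => hnd2 (hnd1 h), ?_⟩
    · intro k hk
      rcases hkeys2 k hk with hk' | hk'
      · exact hkeys1 k hk'
      · exact Or.inr hk'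
    · intro p
      rw [List.foldl_cons] at *
      rw [hgb2 p, hgb1 p]
      simp only [List.mem_cons]
      constructor
      · rintro ((h | h) | ⟨v, hv, h⟩)
        · exact Or.inl h
        · exact Or.inr ⟨x, Or.inl rfl, h⟩
        · exact Or.inr ⟨v, Or.inr hv, h⟩
      · rintro (h | ⟨v, (rfl | hv), h⟩)
        · exact Or.inl (Or.inl h)
        · exact Or.inl (Or.inr h)
        · exact Or.inr ⟨v, hv, h⟩

theorem pv_bor_nat (w : Int) (h0 : 0 ≤ w) (x : Nat) :
    PySem.Int.bor w ((x : Nat) : Int) = ((w.toNat ||| x : Nat) : Int) := by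
  obtain ⟨a, rfl⟩ := Int.eq_ofNat_of_zero_le h0
  rw [PySem.Int.bor_natCast]
  simp

theorem pv_testBit_high (a i : Nat) (ha : a < 2 ^ 4096) (hi : 4096 ≤ i) :
    a.testBit i = false := by
  apply Nat.testBit_lt_two_pow
  exact lt_of_lt_of_le ha (Nat.pow_le_pow_right (by omega) hi)

theorem pv_mask_eq : ((1 : Int) <<< (4096 : Nat) - 1) = ((2 ^ 4096 - 1 : Nat) : Int) := by
  rw [show (1 : Int) <<< (4096 : Nat) = ((1 <<< 4096 : Nat) : Int) from rfl, Nat.one_shiftLeft]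
  have h1 : 1 ≤ 2 ^ 4096 := Nat.one_le_two_pow
  omega

-- global-bit effect of OR-ing a fresh word into one chunk
theorem pv_gb_insert (d : PySem.Dict Int Int) (hwf : pvWfD d) (k : Int) (x : Nat) (p : Nat) :
    pvGb (d.insert k (PySem.Int.bor (d.getD k 0) ((x : Nat) : Int))) p
      ↔ pvGb d p ∨ (((p / 4096 : Nat) : Int) = k ∧ x.testBit (p % 4096) = true) := by
  unfold pvGb
  rw [PySem.Dict.getD_insert]
  split
  · rename_i hb
    rw [pv_bor_nat _ (hwf k).1, Int.toNat_natCast, Nat.testBit_or, hb]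
    simp only [Bool.or_eq_true]
    tauto
  · rename_i hb
    tauto

theorem pv_wf_insert_or (d : PySem.Dict Int Int) (hwf : pvWfD d) (k : Int) (x : Nat)
    (hx : x < 2 ^ 4096) : pvWfD (d.insert k (PySem.Int.bor (d.getD k 0) ((x : Nat) : Int))) := by
  intro k'
  rw [PySem.Dict.getD_insert]
  split
  · rw [pv_bor_nat _ (hwf k).1]
    exact pv_cast_nonneg_lt _ (Nat.or_lt_two_pow ((pv_toNat_lt_pow _).mpr (hwf k).2) hx)
  · exact hwf k'

theorem pv_step2_char (s : Nat) (bw : Int × Int) (hB : 0 ≤ bw.1) (hw0 : 0 ≤ bw.2)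
    (hw : bw.2 < 2 ^ 4096) (d : PySem.Dict Int Int) (hwf : pvWfD d) :
    pvWfD (pvStep2 ((s / 4096 : Nat) : Int) ((s % 4096 : Nat) : Int) d bw)
    ∧ (∀ k ∈ (pvStep2 ((s / 4096 : Nat) : Int) ((s % 4096 : Nat) : Int) d bw).keys, k ∈ d.keys ∨ 0 ≤ k)
    ∧ (d.keys.Nodup → (pvStep2 ((s / 4096 : Nat) : Int) ((s % 4096 : Nat) : Int) d bw).keys.Nodup)
    ∧ (∀ p : Nat, pvGb (pvStep2 ((s / 4096 : Nat) : Int) ((s % 4096 : Nat) : Int) d bw) p ↔ pvGb d p ∨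
        ((((p + s) / 4096 : Nat) : Int) = bw.1 ∧ (bw.2.toNat).testBit ((p + s) % 4096) = true)) := by
  obtain ⟨B, wi⟩ := bw
  simp only at hB hw0 hw
  obtain ⟨a, rfl⟩ := Int.eq_ofNat_of_zero_le hw0
  have ha : a < 2 ^ 4096 := by
    rw [← pv_toNat_lt_pow] at hw
    rwa [Int.toNat_natCast] at hw
  set sq : Nat := s / 4096 with hsq
  set sr : Nat := s % 4096 with hsr0
  have hs : s = 4096 * sq + sr := by omega
  have hsr : sr < 4096 := by omega
  have htoNat : ((a : Nat) : Int).toNat = a := Int.toNat_natCast a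
  have hfst : ((B, ((a : Nat) : Int)).1) = B := rfl
  have hsnd : ((B, ((a : Nat) : Int)).2) = ((a : Nat) : Int) := rfl
  rw [hfst, hsnd, htoNat]
  -- the inserted words, as Nat casts
  have hV1 : (((a : Nat) : Int) >>> (((sr : Nat) : Int)).toNat) = ((a >>> sr : Nat) : Int) := by
    rw [Int.toNat_natCast]
    rfl
  have hV2 : PySem.Int.band (((a : Nat) : Int) <<< ((4096 - ((sr : Nat) : Int)).toNat)) ((1 : Int) <<< (4096 : Nat) - 1)
      = (((a <<< (4096 - sr)) &&& (2 ^ 4096 - 1) : Nat) : Int) := by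
    rw [show ((4096 - ((sr : Nat) : Int)).toNat) = 4096 - sr by omega, pv_mask_eq,
      show (((a : Nat) : Int) <<< (4096 - sr)) = (((a <<< (4096 - sr) : Nat) : Nat) : Int) from rfl,
      PySem.Int.band_natCast]
  have hlowlt : (a >>> sr : Nat) < 2 ^ 4096 := lt_of_le_of_lt (Nat.shiftRight_le _ _) ha
  have hhighlt : ((a <<< (4096 - sr)) &&& (2 ^ 4096 - 1) : Nat) < 2 ^ 4096 := by
    refine lt_of_le_of_lt Nat.and_le_right ?_
    have h1 : 1 ≤ 2 ^ 4096 := Nat.one_le_two_pow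
    omega
  -- the arithmetic core: the two chunk contributions are the bits of a shifted down by s
  have key : ∀ p : Nat,
      ((((p / 4096 : Nat) : Int) = B - ((sq : Nat) : Int) ∧ (a >>> sr).testBit (p % 4096) = true)
        ∨ (sr ≠ 0 ∧ ((p / 4096 : Nat) : Int) = B - ((sq : Nat) : Int) - 1
            ∧ ((a <<< (4096 - sr)) &&& (2 ^ 4096 - 1)).testBit (p % 4096) = true))
      ↔ ((((p + s) / 4096 : Nat) : Int) = B ∧ a.testBit ((p + s) % 4096) = true) := by
    intro p
    rw [Nat.testBit_shiftRight, Nat.testBit_land, Nat.testBit_two_pow_sub_one, Nat.testBit_shiftLeft]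
    simp only [Bool.and_eq_true, decide_eq_true_eq]
    constructor
    · rintro (⟨hb, htb⟩ | ⟨hz, hb, ⟨hge, htb⟩, hlt⟩)
      · have hidx : sr + p % 4096 < 4096 := by
          by_contra hge
          rw [pv_testBit_high a _ ha (by omega)] at htb
          exact Bool.false_ne_true htb
        refine ⟨by omega, ?_⟩
        rwa [show (p + s) % 4096 = sr + p % 4096 by omega]
      · refine ⟨by omega, ?_⟩
        rwa [show (p + s) % 4096 = p % 4096 - (4096 - sr) by omega]
    · rintro ⟨hb, htb⟩
      by_cases hj : p % 4096 + sr < 4096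
      · refine Or.inl ⟨by omega, ?_⟩
        rwa [show sr + p % 4096 = (p + s) % 4096 by omega]
      · refine Or.inr ⟨by omega, by omega, ⟨by omega, ?_⟩, by omega⟩
        rwa [show p % 4096 - (4096 - sr) = (p + s) % 4096 by omega]
  set t : Int := B - ((sq : Nat) : Int) with ht
  by_cases hc1 : (0 : Int) ≤ t
  · by_cases hc2 : (1 : Int) ≤ t ∧ ((sr : Nat) : Int) ≠ 0
    · -- both chunks are written
      have hres : pvStep2 ((sq : Nat) : Int) ((sr : Nat) : Int) d (B, ((a : Nat) : Int))
          = (d.insert t (PySem.Int.bor (d.getD t 0) ((a >>> sr : Nat) : Int))).insert (t - 1)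
              (PySem.Int.bor ((d.insert t (PySem.Int.bor (d.getD t 0) ((a >>> sr : Nat) : Int))).getD (t - 1) 0)
                (((a <<< (4096 - sr)) &&& (2 ^ 4096 - 1) : Nat) : Int)) := by
        unfold pvStep2
        simp only [← ht, if_pos hc1, if_pos hc2, hV1, hV2]
      have hwf1 := pv_wf_insert_or d hwf t (a >>> sr) hlowlt
      have hwf2 := pv_wf_insert_or _ hwf1 (t - 1) _ hhighlt
      rw [hres]
      refine ⟨hwf2, ?_, ?_, ?_⟩
      · intro k hk
        rcases (PySem.Dict.mem_keys_insert _ _ _ _).mp hk with rfl | hk'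
        · exact Or.inr (by omega)
        · rcases (PySem.Dict.mem_keys_insert _ _ _ _).mp hk' with rfl | hk''
          · exact Or.inr (by omega)
          · exact Or.inl hk''
      · intro hnd
        exact PySem.Dict.nodup_keys_insert _ _ _ (PySem.Dict.nodup_keys_insert _ _ _ hnd)
      · intro p
        rw [pv_gb_insert _ hwf1, pv_gb_insert _ hwf, ← key p]
        have hz : sr ≠ 0 := by
          rcases hc2 with ⟨_, h2⟩
          omega
        constructor
        · rintro ((h | h) | h)
          · exact Or.inl h
          · exact Or.inr (Or.inl h)
          · exact Or.inr (Or.inr ⟨hz, by omega, h.2⟩)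
        · rintro (h | (h | ⟨_, hb, htb⟩))
          · exact Or.inl (Or.inl h)
          · exact Or.inl (Or.inr h)
          · exact Or.inr ⟨by omega, htb⟩
    · -- only the aligned chunk is written
      have hres : pvStep2 ((sq : Nat) : Int) ((sr : Nat) : Int) d (B, ((a : Nat) : Int))
          = d.insert t (PySem.Int.bor (d.getD t 0) ((a >>> sr : Nat) : Int)) := by
        unfold pvStep2
        simp only [← ht, if_pos hc1, if_neg hc2, hV1]
      have hwf1 := pv_wf_insert_or d hwf t (a >>> sr) hlowlt
      rw [hres]
      refine ⟨hwf1, ?_, ?_, ?_⟩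
      · intro k hk
        rcases (PySem.Dict.mem_keys_insert _ _ _ _).mp hk with rfl | hk'
        · exact Or.inr hc1
        · exact Or.inl hk'
      · intro hnd
        exact PySem.Dict.nodup_keys_insert _ _ _ hnd
      · intro p
        rw [pv_gb_insert _ hwf, ← key p]
        have hno : ¬ (sr ≠ 0 ∧ ((p / 4096 : Nat) : Int) = B - ((sq : Nat) : Int) - 1
            ∧ ((a <<< (4096 - sr)) &&& (2 ^ 4096 - 1)).testBit (p % 4096) = true) := by
          rintro ⟨hz, hb, _⟩
          apply hc2
          constructor
          · omega
          · omega
        constructor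
        · rintro (h | h)
          · exact Or.inl h
          · exact Or.inr (Or.inl h)
        · rintro (h | (h | h))
          · exact Or.inl h
          · exact Or.inr h
          · exact absurd h hno
  · -- the value's chunk lies below this one: nothing is written
    have hc2 : ¬ ((1 : Int) ≤ t ∧ ((sr : Nat) : Int) ≠ 0) := by
      rintro ⟨h1, _⟩
      omega
    have hres : pvStep2 ((sq : Nat) : Int) ((sr : Nat) : Int) d (B, ((a : Nat) : Int))
        = d := by
      unfold pvStep2
      simp only [← ht, if_neg hc1, if_neg hc2]
    rw [hres]
    refine ⟨hwf, fun k hk => Or.inl hk, fun h => h, ?_⟩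
    intro p
    rw [← key p]
    have hno1 : ¬ (((p / 4096 : Nat) : Int) = B - ((sq : Nat) : Int)
        ∧ (a >>> sr).testBit (p % 4096) = true) := by
      rintro ⟨hb, _⟩
      omega
    have hno2 : ¬ (sr ≠ 0 ∧ ((p / 4096 : Nat) : Int) = B - ((sq : Nat) : Int) - 1
        ∧ ((a <<< (4096 - sr)) &&& (2 ^ 4096 - 1)).testBit (p % 4096) = true) := by
      rintro ⟨_, hb, _⟩
      omega
    constructor
    · intro h
      exact Or.inl h
    · rintro (h | (h | h))
      · exact h
      · exact absurd h hno1
      · exact absurd h hno2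

theorem pv_fold2 (s : Nat) :
    ∀ (items : List (Int × Int)), (∀ bw ∈ items, 0 ≤ bw.1 ∧ 0 ≤ bw.2 ∧ bw.2 < 2 ^ 4096) →
    ∀ (d : PySem.Dict Int Int), pvWfD d →
      pvWfD (items.foldl (pvStep2 ((s / 4096 : Nat) : Int) ((s % 4096 : Nat) : Int)) d)
      ∧ (∀ k ∈ (items.foldl (pvStep2 ((s / 4096 : Nat) : Int) ((s % 4096 : Nat) : Int)) d).keys, k ∈ d.keys ∨ 0 ≤ k)
      ∧ (d.keys.Nodup → (items.foldl (pvStep2 ((s / 4096 : Nat) : Int) ((s % 4096 : Nat) : Int)) d).keys.Nodup)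
      ∧ (∀ p : Nat, pvGb (items.foldl (pvStep2 ((s / 4096 : Nat) : Int) ((s % 4096 : Nat) : Int)) d) p ↔ pvGb d p ∨
          ∃ bw ∈ items, (((p + s) / 4096 : Nat) : Int) = bw.1 ∧ (bw.2.toNat).testBit ((p + s) % 4096) = true) := by
  intro items
  induction items with
  | nil =>
    intro _ d hwf
    exact ⟨hwf, fun k hk => Or.inl hk, fun h => h, fun p => by simp⟩
  | cons x t ih =>
    intro hl d hwf
    obtain ⟨h1, h2, h3⟩ := hl x (by simp)
    obtain ⟨hwf1, hkeys1, hnd1, hgb1⟩ := pv_step2_char s x h1 h2 h3 d hwf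
    obtain ⟨hwf2, hkeys2, hnd2, hgb2⟩ := ih (fun bw hbw => hl bw (by simp [hbw])) _ hwf1
    refine ⟨hwf2, ?_, fun h => hnd2 (hnd1 h), ?_⟩
    · intro k hk
      rcases hkeys2 k hk with hk' | hk'
      · exact hkeys1 k hk'
      · exact Or.inr hk'
    · intro p
      rw [List.foldl_cons] at *
      rw [hgb2 p, hgb1 p]
      simp only [List.mem_cons]
      constructor
      · rintro ((h | h) | ⟨bw, hbw, h⟩)
        · exact Or.inl h
        · exact Or.inr ⟨x, Or.inl rfl, h⟩
        · exact Or.inr ⟨bw, Or.inr hbw, h⟩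
      · rintro (h | ⟨bw, (rfl | hbw), h⟩)
        · exact Or.inl (Or.inl h)
        · exact Or.inl (Or.inr h)
        · exact Or.inr ⟨bw, hbw, h⟩

-- looking a global bit up through the items list
theorem pv_gb_items (d : PySem.Dict Int Int) (hnd : d.keys.Nodup) (x : Nat) :
    pvGb d x ↔ ∃ bw ∈ d.items, ((x / 4096 : Nat) : Int) = bw.1 ∧ (bw.2.toNat).testBit (x % 4096) = true := by
  unfold pvGb
  rw [PySem.Dict.getD_eq_get?_getD]
  cases hK : d.get? ((x / 4096 : Nat) : Int) with
  | none =>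
    simp only [Option.getD_none, Int.toNat_zero, Nat.zero_testBit, Bool.false_eq_true, false_iff]
    rintro ⟨bw, hbw, hb, htb⟩
    have := PySem.Dict.get?_of_mem_items d (k := bw.1) (v := bw.2) (by simpa using hbw) hnd
    rw [← hb] at this
    rw [this] at hK
    exact Option.some_ne_none _ hK
  | some w =>
    simp only [Option.getD_some]
    constructor
    · intro htb
      exact ⟨(((x / 4096 : Nat) : Int), w), PySem.Dict.mem_items_of_get?_eq_some d hK, rfl, htb⟩
    · rintro ⟨bw, hbw, hb, htb⟩
      have := PySem.Dict.get?_of_mem_items d (k := bw.1) (v := bw.2) (by simpa using hbw) hnd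
      rw [← hb] at this
      rw [this] at hK
      rwa [← Option.some_inj.mp hK]

-- the set of global positions of a chunked bitset, as a Finset
def pvPosSet (d : PySem.Dict Int Int) : Finset Nat :=
  d.keys.toFinset.biUnion (fun k =>
    ((Finset.range 4096).filter (fun j => (d.getD k 0).toNat.testBit j)).image
      (fun j => 4096 * k.toNat + j))

theorem pv_mem_posSet (d : PySem.Dict Int Int) (hk : ∀ k ∈ d.keys, 0 ≤ k) (p : Nat) :
    p ∈ pvPosSet d ↔ pvGb d p := by
  unfold pvPosSet pvGb
  rw [Finset.mem_biUnion]
  constructor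
  · rintro ⟨k, hkmem, hp⟩
    rw [Finset.mem_image] at hp
    obtain ⟨j, hj, rfl⟩ := hp
    rw [Finset.mem_filter, Finset.mem_range] at hj
    have hk0 := hk k (List.mem_toFinset.mp hkmem)
    have hb : (((4096 * k.toNat + j) / 4096 : Nat) : Int) = k := by omega
    rw [hb, show (4096 * k.toNat + j) % 4096 = j by omega]
    exact hj.2
  · intro htb
    refine ⟨((p / 4096 : Nat) : Int), ?_, ?_⟩
    · rw [List.mem_toFinset]
      by_contra hmem
      have hc : d.contains ((p / 4096 : Nat) : Int) = false := by
        by_contra hcc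
        exact hmem ((PySem.Dict.contains_iff_mem_keys _ _).mp (by simpa using hcc))
      rw [PySem.Dict.getD_of_not_contains d 0 hc] at htb
      simp at htb
    · rw [Finset.mem_image]
      refine ⟨p % 4096, ?_, by omega⟩
      rw [Finset.mem_filter, Finset.mem_range]
      exact ⟨Nat.mod_lt _ (by omega), htb⟩

theorem pv_sum_cast (g : Int → Nat) : ∀ (l : List Int),
    (l.map (fun k => ((g k : Nat) : Int))).sum = (((l.map g).sum : Nat) : Int) := by
  intro l
  induction l with
  | nil => rfl
  | cons x t ih => simp [ih]

theorem pv_card_posSet (d : PySem.Dict Int Int) (hnd : d.keys.Nodup)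
    (hk : ∀ k ∈ d.keys, 0 ≤ k) (hwf : pvWfD d) :
    (d.values.map (fun w => (PySem.Int.bitCount w : Int))).sum = ((pvPosSet d).card : Int) := by
  have hL : (d.values.map (fun w => (PySem.Int.bitCount w : Int))).sum
      = (((d.keys.map (fun k => pvPop (d.getD k 0).toNat)).sum : Nat) : Int) := by
    rw [PySem.Dict.values_eq_map_keys d hnd 0, List.map_map,
      ← pv_sum_cast (fun k => pvPop (d.getD k 0).toNat)]
    congr 1
    apply List.map_congr_left
    intro k _
    simp only [Function.comp]
    conv_lhs => rw [show d.getD k 0 = (((d.getD k 0).toNat : Nat) : Int) by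
      have := (hwf k).1; omega]
    rw [pv_bitCount_eq_pop]
  have hdisj : ∀ k ∈ d.keys.toFinset, ∀ k' ∈ d.keys.toFinset, k ≠ k' →
      Disjoint (((Finset.range 4096).filter (fun j => (d.getD k 0).toNat.testBit j)).image
          (fun j => 4096 * k.toNat + j))
        (((Finset.range 4096).filter (fun j => (d.getD k' 0).toNat.testBit j)).image
          (fun j => 4096 * k'.toNat + j)) := by
    intro k hk1 k' hk2 hne
    have h0 := hk k (List.mem_toFinset.mp hk1)
    have h0' := hk k' (List.mem_toFinset.mp hk2)
    rw [Finset.disjoint_left]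
    intro x hx hx'
    rw [Finset.mem_image] at hx hx'
    obtain ⟨j, hj, hxe⟩ := hx
    obtain ⟨j', hj', hxe'⟩ := hx'
    rw [Finset.mem_filter, Finset.mem_range] at hj hj'
    have hjl := hj.1
    have hjl' := hj'.1
    apply hne
    omega
  have himg : ∀ k ∈ d.keys.toFinset,
      (((Finset.range 4096).filter (fun j => (d.getD k 0).toNat.testBit j)).image
        (fun j => 4096 * k.toNat + j)).card = pvPop (d.getD k 0).toNat := by
    intro k _
    rw [Finset.card_image_of_injective _ (fun a b h => by omega)]
    rw [← pv_pop_card 4096 _ ((pv_toNat_lt_pow _).mpr (hwf k).2)]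
  have hR : (pvPosSet d).card = (d.keys.map (fun k => pvPop (d.getD k 0).toNat)).sum := by
    unfold pvPosSet
    rw [Finset.card_biUnion hdisj, Finset.sum_congr rfl himg,
      List.sum_toFinset _ hnd]
  rw [hL, hR]


theorem pv_gb_empty (p : Nat) : ¬ pvGb PySem.Dict.empty p := by
  unfold pvGb
  rw [PySem.Dict.getD_empty]
  simp

-- phase 2: folding the shifted copies of the value bitset over all values
theorem pv_phase2 (m : Int) (bitsD : PySem.Dict Int Int)
    (hitems : ∀ bw ∈ bitsD.items, 0 ≤ bw.1 ∧ 0 ≤ bw.2 ∧ bw.2 < 2 ^ 4096) :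
    ∀ (l : List Int), (∀ v ∈ l, m ≤ v) → ∀ (d : PySem.Dict Int Int), pvWfD d →
      pvWfD (l.foldl (fun d v => bitsD.items.foldl
          (pvStep2 (PySem.Int.floordiv (v - m) 4096) (PySem.Int.mod (v - m) 4096)) d) d)
      ∧ (∀ k ∈ (l.foldl (fun d v => bitsD.items.foldl
          (pvStep2 (PySem.Int.floordiv (v - m) 4096) (PySem.Int.mod (v - m) 4096)) d) d).keys, k ∈ d.keys ∨ 0 ≤ k)
      ∧ (d.keys.Nodup → (l.foldl (fun d v => bitsD.items.foldl
          (pvStep2 (PySem.Int.floordiv (v - m) 4096) (PySem.Int.mod (v - m) 4096)) d) d).keys.Nodup)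
      ∧ (∀ p : Nat, pvGb (l.foldl (fun d v => bitsD.items.foldl
          (pvStep2 (PySem.Int.floordiv (v - m) 4096) (PySem.Int.mod (v - m) 4096)) d) d) p ↔ pvGb d p ∨
          ∃ v ∈ l, ∃ bw ∈ bitsD.items,
            (((p + (v - m).toNat) / 4096 : Nat) : Int) = bw.1
              ∧ (bw.2.toNat).testBit ((p + (v - m).toNat) % 4096) = true) := by
  intro l
  induction l with
  | nil =>
    intro _ d hwf
    exact ⟨hwf, fun k hk => Or.inl hk, fun h => h, fun p => by simp⟩
  | cons x t ih =>
    intro hl d hwf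
    have hx : m ≤ x := hl x (by simp)
    have hrw : pvStep2 (PySem.Int.floordiv (x - m) 4096) (PySem.Int.mod (x - m) 4096)
        = pvStep2 (((x - m).toNat / 4096 : Nat) : Int) (((x - m).toNat % 4096 : Nat) : Int) := by
      rw [pv_floordiv_toNat _ (by omega), pv_mod_toNat _ (by omega)]
    obtain ⟨hwf1, hkeys1, hnd1, hgb1⟩ :=
      pv_fold2 ((x - m).toNat) bitsD.items hitems d hwf
    rw [← hrw] at hwf1 hkeys1 hnd1 hgb1
    obtain ⟨hwf2, hkeys2, hnd2, hgb2⟩ := ih (fun v hv => hl v (by simp [hv])) _ hwf1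
    refine ⟨hwf2, ?_, fun h => hnd2 (hnd1 h), ?_⟩
    · intro k hk
      rcases hkeys2 k hk with hk' | hk'
      · exact hkeys1 k hk'
      · exact Or.inr hk'
    · intro p
      rw [List.foldl_cons] at *
      rw [hgb2 p, hgb1 p]
      simp only [List.mem_cons]
      constructor
      · rintro ((h | h) | ⟨v, hv, h⟩)
        · exact Or.inl h
        · exact Or.inr ⟨x, Or.inl rfl, h⟩
        · exact Or.inr ⟨v, Or.inr hv, h⟩
      · rintro (h | ⟨v, (rfl | hv), h⟩)
        · exact Or.inl (Or.inl h)
        · exact Or.inl (Or.inr h)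
        · exact Or.inr ⟨v, hv, h⟩

-- the value bitset has one global bit per distinct value
theorem pv_count_bits (nums : List Int) (m : Int) (hm : ∀ v ∈ nums, m ≤ v)
    (d : PySem.Dict Int Int) (hk : ∀ k ∈ d.keys, 0 ≤ k)
    (hgb : ∀ p : Nat, pvGb d p ↔ ∃ v ∈ nums, (v - m).toNat = p) :
    (pvPosSet d).card = nums.toFinset.card := by
  refine Finset.card_bij (fun p _ => m + (p : Int)) ?_ ?_ ?_
  · intro p hp
    obtain ⟨v, hv, hveq⟩ := (hgb p).mp ((pv_mem_posSet d hk p).mp hp)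
    show m + (p : Int) ∈ nums.toFinset
    rw [List.mem_toFinset]
    have := hm v hv
    rw [show m + (p : Int) = v by omega]
    exact hv
  · intro a ha b hb h
    have h' : m + (a : Int) = m + (b : Int) := h
    omega
  · intro v hv
    rw [List.mem_toFinset] at hv
    have hmv := hm v hv
    refine ⟨(v - m).toNat, (pv_mem_posSet d hk _).mpr ((hgb _).mpr ⟨v, hv, rfl⟩),
      show m + (((v - m).toNat : Nat) : Int) = v by omega⟩

-- the difference bitset has the zero bit plus one global bit per distinct positive difference
theorem pv_count_diff (nums : List Int) (m : Int) (hm0 : m ∈ nums)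
    (d : PySem.Dict Int Int) (hk : ∀ k ∈ d.keys, 0 ≤ k)
    (hgb : ∀ p : Nat, pvGb d p ↔ ∃ v ∈ nums, ∃ w ∈ nums, w = v + (p : Int)) :
    (pvPosSet d).card = ((pvAset nums).filter (fun y => y != 0)).length + 1 := by
  have h0 : 0 ∈ pvPosSet d :=
    (pv_mem_posSet d hk 0).mpr ((hgb 0).mpr ⟨m, hm0, m, hm0, by omega⟩)
  have hmemf : ∀ y : Int, y ∈ ((pvAset nums).filter (fun y => y != 0)).toFinset ↔ pvGood nums y := by
    intro y
    rw [List.mem_toFinset, List.mem_filter]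
    simp only [bne_iff_ne]
    rw [pv_memA_char]
    constructor
    · rintro ⟨(⟨rfl, _⟩ | hg), hne⟩
      · exact absurd rfl hne
      · exact hg
    · intro hg
      refine ⟨Or.inr hg, fun h => pv_zero_not_good nums (h ▸ hg)⟩
  have hcard : ((pvPosSet d).erase 0).card = ((pvAset nums).filter (fun y => y != 0)).length := by
    rw [← List.toFinset_card_of_nodup ((pv_nodupA nums).filter _)]
    refine Finset.card_bij (fun p _ => (p : Int)) ?_ ?_ ?_
    · intro p hp
      rw [Finset.mem_erase] at hp
      obtain ⟨v, hv, w, hw, hweq⟩ := (hgb p).mp ((pv_mem_posSet d hk p).mp hp.2)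
      show ((p : Nat) : Int) ∈ ((pvAset nums).filter (fun y => y != 0)).toFinset
      refine (hmemf _).mpr ⟨v, hv, w, hw, ?_, by omega⟩
      have hp0 : p ≠ 0 := hp.1
      omega
    · intro a ha b hb h
      have h' : ((a : Nat) : Int) = ((b : Nat) : Int) := h
      omega
    · intro y hy
      have hg := (hmemf y).mp hy
      have hy1 : 1 ≤ y := by obtain ⟨a, _, b, _, hab, rfl⟩ := hg; omega
      obtain ⟨a, ha, b, hb, hab, rfl⟩ := hg
      refine ⟨(b - a).toNat, Finset.mem_erase.mpr ⟨by omega, ?_⟩,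
        show (((b - a).toNat : Nat) : Int) = b - a by omega⟩
      exact (pv_mem_posSet d hk _).mpr ((hgb _).mpr ⟨a, ha, b, hb, by omega⟩)
  rw [← hcard, Finset.card_erase_of_mem h0]
  have hle : 1 ≤ (pvPosSet d).card := Finset.card_pos.mpr ⟨0, h0⟩
  omega

theorem pv_card_lt_of_not_nodup (l : List Int) (h : ¬ l.Nodup) : l.toFinset.card < l.length := by
  induction l with
  | nil => exact absurd List.nodup_nil h
  | cons x t ih =>
    rw [List.toFinset_cons]
    rcases Decidable.em (x ∈ t) with hx | hx
    · have : insert x t.toFinset = t.toFinset := by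
        simp [List.mem_toFinset, hx]
      rw [this]
      have := List.toFinset_card_le t
      simp only [List.length_cons]
      omega
    · have ht : ¬ t.Nodup := by
        intro hnd; exact h (List.nodup_cons.mpr ⟨hx, hnd⟩)
      have h1 := Finset.card_insert_le x t.toFinset
      have h2 := ih ht
      simp only [List.length_cons]
      omega

-- A's set splits into the positive differences plus the zero entry (present iff duplicates)
theorem pv_lenA_split (nums : List Int) :
    (pvAset nums).length
      = ((pvAset nums).filter (fun y => y != 0)).length + (if nums.Nodup then 0 else 1) := by
  by_cases h : nums.Nodup
  · have : (pvAset nums).filter (fun y => y != 0) = pvAset nums := by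
      refine List.filter_eq_self.mpr (fun y hy => ?_)
      rcases (pv_memA_char nums y).mp hy with ⟨_, hnd⟩ | hg
      · exact absurd h hnd
      · simp only [bne_iff_ne]
        intro hy0; exact pv_zero_not_good nums (hy0 ▸ hg)
    rw [this]; simp [h]
  · have h0 : (0 : Int) ∈ pvAset nums := (pv_memA_char nums 0).mpr (Or.inl ⟨rfl, h⟩)
    have hperm := List.perm_cons_erase h0
    have herase : (pvAset nums).erase 0 = (pvAset nums).filter (fun y => y != 0) :=
      (pv_nodupA nums).erase_eq_filter 0
    rw [hperm.length_eq, List.length_cons, ← herase]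
    simp [h]

-- ===== VERDICT (by name: the statement is the Claim_ definition above) =====
theorem calc_ac_value_spec : Claim_equal_calc_ac_value := by
  intro nums _
  show calc_ac_value nums = calc_ac_value_alt nums
  rcases hmin : PySem.List.min? nums (fun x => x) with _ | m
  · have hnil := (PySem.List.min?_eq_none_iff nums (fun x => x)).mp hmin
    subst hnil
    decide
  · have hm : ∀ v ∈ nums, m ≤ v := fun v hv => PySem.List.min?_isMin hmin v hv
    have hm0 : m ∈ nums := PySem.List.min?_mem hmin
    obtain ⟨hwfB, hkeysB', hndB', hgbB'⟩ := pv_phase1 m nums hm PySem.Dict.empty pv_wf_empty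
    set bitsD := nums.foldl (pvStep1 m) PySem.Dict.empty with hbitsD
    have hndB : bitsD.keys.Nodup := hndB' (PySem.Dict.nodup_keys_empty)
    have hkeysB : ∀ k ∈ bitsD.keys, 0 ≤ k := by
      intro k hk
      rcases hkeysB' k hk with h | h
      · rw [PySem.Dict.keys_empty] at h
        exact absurd h (List.not_mem_nil)
      · exact h
    have hgbB : ∀ p : Nat, pvGb bitsD p ↔ ∃ v ∈ nums, (v - m).toNat = p := by
      intro p
      rw [hgbB' p]
      have := pv_gb_empty p
      tauto
    have hitems : ∀ bw ∈ bitsD.items, 0 ≤ bw.1 ∧ 0 ≤ bw.2 ∧ bw.2 < 2 ^ 4096 := by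
      intro bw hbw
      have hbw' : (bw.1, bw.2) ∈ bitsD.items := by simpa using hbw
      have hget : bitsD.get? bw.1 = some bw.2 := PySem.Dict.get?_of_mem_items bitsD hbw' hndB
      have hk1 : bw.1 ∈ bitsD.keys := by
        by_contra hmem
        rw [(PySem.Dict.get?_eq_none_iff_not_mem_keys _ _).mpr hmem] at hget
        exact Option.some_ne_none _ hget.symm
      have hv : bitsD.getD bw.1 0 = bw.2 := PySem.Dict.getD_of_get?_eq_some _ _ hget
      exact ⟨hkeysB _ hk1, hv ▸ (hwfB bw.1).1, hv ▸ (hwfB bw.1).2⟩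
    obtain ⟨hwfD, hkeysD', hndD', hgbD'⟩ :=
      pv_phase2 m bitsD hitems nums hm PySem.Dict.empty pv_wf_empty
    set diffD := nums.foldl (fun d v => bitsD.items.foldl
        (pvStep2 (PySem.Int.floordiv (v - m) 4096) (PySem.Int.mod (v - m) 4096)) d)
      PySem.Dict.empty with hdiffD
    have hndD : diffD.keys.Nodup := hndD' (PySem.Dict.nodup_keys_empty)
    have hkeysD : ∀ k ∈ diffD.keys, 0 ≤ k := by
      intro k hk
      rcases hkeysD' k hk with h | h
      · rw [PySem.Dict.keys_empty] at h
        exact absurd h (List.not_mem_nil)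
      · exact h
    have hgbD : ∀ p : Nat, pvGb diffD p ↔ ∃ v ∈ nums, ∃ w ∈ nums, w = v + (p : Int) := by
      intro p
      rw [hgbD' p]
      constructor
      · rintro (h | ⟨v, hv, hbw⟩)
        · exact absurd h (pv_gb_empty p)
        · have hg := (pv_gb_items bitsD hndB (p + (v - m).toNat)).mpr hbw
          obtain ⟨w, hw, hweq⟩ := (hgbB _).mp hg
          have h1 := hm v hv
          have h2 := hm w hw
          exact ⟨v, hv, w, hw, by omega⟩
      · rintro ⟨v, hv, w, hw, hweq⟩
        refine Or.inr ⟨v, hv, (pv_gb_items bitsD hndB (p + (v - m).toNat)).mp ?_⟩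
        refine (hgbB _).mpr ⟨w, hw, ?_⟩
        have h1 := hm v hv
        have h2 := hm w hw
        omega
    have hcntB := pv_count_bits nums m hm bitsD hkeysB hgbB
    have hcntD := pv_count_diff nums m hm0 diffD hkeysD hgbD
    have hsumB := pv_card_posSet bitsD hndB hkeysB hwfB
    have hsumD := pv_card_posSet diffD hndD hkeysD hwfD
    have hALT : calc_ac_value_alt nums
        = ((diffD.values.map (fun w => (PySem.Int.bitCount w : Int))).sum - 1)
          + (if (bitsD.values.map (fun w => (PySem.Int.bitCount w : Int))).sum < PySem.List.len nums then 1 else 0)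
          - (PySem.List.len nums - 1) := by
      unfold calc_ac_value_alt
      rw [hmin]
      rfl
    rw [hALT, calc_eq_pvAset, hsumB, hsumD, hcntB, hcntD]
    have hlen : (PySem.List.sorted nums (fun x => x) false).length = nums.length :=
      (PySem.List.sorted_perm nums (fun x => x) false).length_eq
    have hsplit := pv_lenA_split nums
    simp only [PySem.Set.len, PySem.List.len, hlen]
    by_cases h : nums.Nodup
    · have hc : nums.toFinset.card = nums.length := List.toFinset_card_of_nodup h
      rw [if_neg (by omega)]
      simp only [h, if_true] at hsplit
      omega
    · have hc := pv_card_lt_of_not_nodup nums h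
      rw [if_pos (by omega)]
      simp only [h, if_false] at hsplit
      omega
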